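-- pv_equiv track=rewrite | github.com/Belladonna03/data_collection_analysis_pipeline | agents/data_collection/discovery.py | _infer_modality
-- ===== SOURCE A (Python) =====
-- def _infer_modality(tags: list[str]) -> str | None:
--     """Infer modality from provider tags."""
--
--     lowered_tags = {tag.casefold() for tag in tags}
--     if {"audio", "speech"} & lowered_tags:
--         return "audio"
--     if {"image", "vision"} & lowered_tags:
--         return "image"
--     if {"text", "nlp"} & lowered_tags:
--         return "text"
--     if {"tabular", "csv", "timeseries"} & lowered_tags:
--         return "tabular"
--     return None
-- ===== SOURCE B (Python) =====
-- _RANK = {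
--     "audio": 0, "speech": 0,
--     "image": 1, "vision": 1,
--     "text": 2, "nlp": 2,
--     "tabular": 3, "csv": 3, "timeseries": 3,
-- }
--
-- _NAMES = ["audio", "image", "text", "tabular"]
--
--
-- def _infer_modality(tags: list[str]) -> str | None:
--     """Infer modality from provider tags."""
--     # Single pass: keep the minimum (= highest-priority) rank seen; 4 = no match.
--     best = 4
--     for tag in tags:
--         best = min(best, _RANK.get(tag.casefold(), 4))
--     return _NAMES[best] if best < 4 else None
-- ===== Notes on version B (the rewrite author's own statement) =====
-- stated objective: alternative
-- what changed: Replaces A's four staged set-intersection checks with early returns by a single fold that maintains the minimum numeric priority rank of any matching tag, decoding the rank to a modality name at the end.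
import Mathlib
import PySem

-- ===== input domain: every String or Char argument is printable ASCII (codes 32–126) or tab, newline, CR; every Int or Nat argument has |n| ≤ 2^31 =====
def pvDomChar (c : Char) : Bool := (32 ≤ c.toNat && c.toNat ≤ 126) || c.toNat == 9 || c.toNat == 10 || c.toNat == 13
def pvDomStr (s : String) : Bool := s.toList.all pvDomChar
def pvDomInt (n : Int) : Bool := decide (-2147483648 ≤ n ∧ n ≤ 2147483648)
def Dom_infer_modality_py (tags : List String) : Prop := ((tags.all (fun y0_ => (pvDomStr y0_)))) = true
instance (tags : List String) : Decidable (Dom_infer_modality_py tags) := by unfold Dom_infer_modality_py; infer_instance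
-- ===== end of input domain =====

-- B replaces A's four staged set-intersection checks by one min-rank fold over the tags
-- plus a final rank→name decode (objective: alternative, same cost).
-- (casefold is ported as PySem.Str.lower: exact on the ASCII domain.)

-- ===== PORT A =====
def infer_modality_py (tags : List String) : Option String :=
  let lowered : PySem.Set String := PySem.Set.ofList (tags.map PySem.Str.lower)
  if PySem.Set.inter (PySem.Set.ofList ["audio", "speech"]) lowered ≠ [] then some "audio"
  else if PySem.Set.inter (PySem.Set.ofList ["image", "vision"]) lowered ≠ [] then some "image"
  else if PySem.Set.inter (PySem.Set.ofList ["text", "nlp"]) lowered ≠ [] then some "text"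
  else if PySem.Set.inter (PySem.Set.ofList ["tabular", "csv", "timeseries"]) lowered ≠ [] then some "tabular"
  else none

-- ===== PORT B =====
def pvRank : PySem.Dict String Int :=
  PySem.Dict.ofList [("audio", 0), ("speech", 0),
    ("image", 1), ("vision", 1),
    ("text", 2), ("nlp", 2),
    ("tabular", 3), ("csv", 3), ("timeseries", 3)]

def pvNames : List String := ["audio", "image", "text", "tabular"]

def infer_modality_py_alt (tags : List String) : Option String :=
  let best : Int := tags.foldl (fun b tag => min b (pvRank.getD (PySem.Str.lower tag) 4)) 4
  if best < 4 then PySem.List.pyGet? pvNames best else none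

-- ===== PRECONDITION & SPEC =====
def Spec_infer_modality_py (tags : List String) (out : Option String) : Prop := out = infer_modality_py_alt tags
instance (tags : List String) (out : Option String) : Decidable (Spec_infer_modality_py tags out) := by unfold Spec_infer_modality_py; infer_instance

-- ===== CLAIM (what is proved, stated in full; the proofs are below) =====
def Claim_equal_infer_modality_py : Prop := ∀ (tags : List String), Dom_infer_modality_py tags → Spec_infer_modality_py tags (infer_modality_py tags)

-- ===== LEMMAS AND PROOFS =====

theorem pv_interA (tags : List String) (ks : List String) :
    (PySem.Set.inter (PySem.Set.ofList ks) (PySem.Set.ofList (tags.map PySem.Str.lower)) ≠ []) ↔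
      ∃ t ∈ tags, PySem.Str.lower t ∈ ks := by
  rw [Ne, List.eq_nil_iff_forall_not_mem]
  push Not
  constructor
  · rintro ⟨x, hx⟩
    rw [PySem.Set.mem_inter, PySem.Set.mem_ofList, PySem.Set.mem_ofList, List.mem_map] at hx
    obtain ⟨hk, t, ht, rfl⟩ := hx
    exact ⟨t, ht, hk⟩
  · rintro ⟨t, ht, hk⟩
    exact ⟨PySem.Str.lower t, by
      rw [PySem.Set.mem_inter, PySem.Set.mem_ofList, PySem.Set.mem_ofList, List.mem_map]
      exact ⟨hk, t, ht, rfl⟩⟩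

theorem pv_rank_eq (k : String) :
    pvRank.getD k 4 =
      if k = "audio" ∨ k = "speech" then 0
      else if k = "image" ∨ k = "vision" then 1
      else if k = "text" ∨ k = "nlp" then 2
      else if k = "tabular" ∨ k = "csv" ∨ k = "timeseries" then 3
      else 4 := by
  have hd : pvRank = PySem.Dict.mk [("audio", (0:Int)), ("speech", 0), ("image", 1), ("vision", 1),
      ("text", 2), ("nlp", 2), ("tabular", 3), ("csv", 3), ("timeseries", 3)] := by decide
  rw [hd, PySem.Dict.getD_eq_get?_getD]
  simp only [PySem.Dict.get?_mk_cons, beq_iff_eq]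
  split_ifs <;> simp_all [PySem.Dict.get?, eq_comm]

theorem pv_rank_nonneg (k : String) : 0 ≤ pvRank.getD k 4 := by
  rw [pv_rank_eq]; split_ifs <;> norm_num

theorem pv_foldl_min_ge (tags : List String) (a : Int) (h : 0 ≤ a) :
    0 ≤ tags.foldl (fun b tag => min b (pvRank.getD (PySem.Str.lower tag) 4)) a := by
  induction tags generalizing a with
  | nil => exact h
  | cons t ts ih =>
    exact ih _ (le_min h (pv_rank_nonneg _))

theorem pv_foldl_min_le (tags : List String) (a k : Int) :
    (tags.foldl (fun b tag => min b (pvRank.getD (PySem.Str.lower tag) 4)) a ≤ k) ↔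
      a ≤ k ∨ ∃ t ∈ tags, pvRank.getD (PySem.Str.lower t) 4 ≤ k := by
  induction tags generalizing a with
  | nil => simp
  | cons t ts ih =>
    simp only [List.foldl_cons, ih, min_le_iff, List.mem_cons]
    constructor
    · rintro (h | ⟨u, hu, hr⟩)
      · rcases h with h | h
        · exact Or.inl h
        · exact Or.inr ⟨t, Or.inl rfl, h⟩
      · exact Or.inr ⟨u, Or.inr hu, hr⟩
    · rintro (h | ⟨u, hu, hr⟩)
      · exact Or.inl (Or.inl h)
      · rcases hu with rfl | hu
        · exact Or.inl (Or.inr hr)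
        · exact Or.inr ⟨u, hu, hr⟩

theorem pv_best_eq (tags : List String) :
    tags.foldl (fun b tag => min b (pvRank.getD (PySem.Str.lower tag) 4)) 4 =
      if ∃ t ∈ tags, PySem.Str.lower t ∈ (["audio", "speech"] : List String) then 0
      else if ∃ t ∈ tags, PySem.Str.lower t ∈ (["image", "vision"] : List String) then 1
      else if ∃ t ∈ tags, PySem.Str.lower t ∈ (["text", "nlp"] : List String) then 2
      else if ∃ t ∈ tags, PySem.Str.lower t ∈ (["tabular", "csv", "timeseries"] : List String) then 3
      else 4 := by
  set best := tags.foldl (fun b tag => min b (pvRank.getD (PySem.Str.lower tag) 4)) 4 with hb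
  have hge : 0 ≤ best := pv_foldl_min_ge tags 4 (by norm_num)
  have hle : ∀ k : Int, (best ≤ k) ↔ 4 ≤ k ∨ ∃ t ∈ tags, pvRank.getD (PySem.Str.lower t) 4 ≤ k :=
    fun k => pv_foldl_min_le tags 4 k
  have hr : ∀ t ∈ tags, pvRank.getD (PySem.Str.lower t) 4 =
      if PySem.Str.lower t ∈ (["audio", "speech"] : List String) then 0
      else if PySem.Str.lower t ∈ (["image", "vision"] : List String) then 1
      else if PySem.Str.lower t ∈ (["text", "nlp"] : List String) then 2
      else if PySem.Str.lower t ∈ (["tabular", "csv", "timeseries"] : List String) then 3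
      else 4 := by
    intro t _
    rw [pv_rank_eq]
    simp only [List.mem_cons, List.not_mem_nil, or_false]
  split_ifs with pa pi pt pb
  · obtain ⟨t, ht, h⟩ := pa
    have h1 : best ≤ 0 := (hle 0).2 (Or.inr ⟨t, ht, by rw [hr t ht]; simp [h]⟩)
    omega
  · obtain ⟨t, ht, h⟩ := pi
    have h1 : best ≤ 1 := (hle 1).2 (Or.inr ⟨t, ht, by
      rw [hr t ht]; split_ifs <;> norm_num⟩)
    have h2 : ¬ best ≤ 0 := by
      intro h0
      rcases (hle 0).1 h0 with h4 | ⟨u, hu, hru⟩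
      · omega
      · rw [hr u hu] at hru
        split_ifs at hru with c1 c2 c3 c4
        · exact pa ⟨u, hu, c1⟩
        all_goals omega
    omega
  · obtain ⟨t, ht, h⟩ := pt
    have h1 : best ≤ 2 := (hle 2).2 (Or.inr ⟨t, ht, by
      rw [hr t ht]; split_ifs <;> norm_num⟩)
    have h2 : ¬ best ≤ 1 := by
      intro h0
      rcases (hle 1).1 h0 with h4 | ⟨u, hu, hru⟩
      · omega
      · rw [hr u hu] at hru
        split_ifs at hru with c1 c2 c3 c4
        · exact pa ⟨u, hu, c1⟩
        · exact pi ⟨u, hu, c2⟩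
        all_goals omega
    omega
  · obtain ⟨t, ht, h⟩ := pb
    have h1 : best ≤ 3 := (hle 3).2 (Or.inr ⟨t, ht, by
      rw [hr t ht]; split_ifs <;> norm_num⟩)
    have h2 : ¬ best ≤ 2 := by
      intro h0
      rcases (hle 2).1 h0 with h4 | ⟨u, hu, hru⟩
      · omega
      · rw [hr u hu] at hru
        split_ifs at hru with c1 c2 c3 c4
        · exact pa ⟨u, hu, c1⟩
        · exact pi ⟨u, hu, c2⟩
        · exact pt ⟨u, hu, c3⟩
        all_goals omega
    omega
  · have h2 : ¬ best ≤ 3 := by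
      intro h0
      rcases (hle 3).1 h0 with h4 | ⟨u, hu, hru⟩
      · omega
      · rw [hr u hu] at hru
        split_ifs at hru with c1 c2 c3 c4
        · exact pa ⟨u, hu, c1⟩
        · exact pi ⟨u, hu, c2⟩
        · exact pt ⟨u, hu, c3⟩
        · exact pb ⟨u, hu, c4⟩
        · omega
    have h3 : best ≤ 4 := (hle 4).2 (Or.inl (le_refl _))
    omega

-- ===== VERDICT (by name: the statement is the Claim_ definition above) =====
theorem infer_modality_py_spec : Claim_equal_infer_modality_py := by
  intro tags _
  show infer_modality_py tags = infer_modality_py_alt tags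
  simp only [infer_modality_py, infer_modality_py_alt, pv_interA, pv_best_eq]
  split_ifs <;> first | decide | omega
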